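-- pv_equiv track=rewrite | github.com/epissteven1/FBVRS-Capstone | App/App_Pages/Record.py | text_to_baybayin_images
-- ===== SOURCE A (Python) =====
-- baybayin_image_mapping = {
--     'a': 'A.png', 'e': 'E.png', 'i': 'I.png', 'o': 'O.png', 'u': 'U.png',
--     'ka': 'ka.png', 'ga': 'ga.png', 'nga': 'nga.png', 'ta': 'ta.png', 'da': 'da.png',
--     'na': 'na.png', 'pa': 'pa.png', 'ba': 'Ba.png', 'ma': 'ma.png', 'ya': 'ya.png',
--     'ra': 'ra.png', 'la': 'la.png', 'wa': 'wa.png', 'sa': 'sa.png', 'ha': 'ha.png'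
-- }
--
-- def split_into_syllables(word):
--     vowels = 'aeiou'
--     syllables = []
--     current_syllable = ""
--     for char in word:
--         if char in vowels:
--             current_syllable += char
--             syllables.append(current_syllable)
--             current_syllable = ""
--         else:
--             if current_syllable:
--                 syllables.append(current_syllable)
--             current_syllable = char
--     if current_syllable:
--         syllables.append(current_syllable)
--     return syllables
--
-- def text_to_baybayin_images(text):
--     words = text.split()
--     baybayin_images = []
--     for word in words:
--         syllables = split_into_syllables(word)
--         for syllable in syllables:
--             image_filename = baybayin_image_mapping.get(syllable)
--             if image_filename:
--                 baybayin_images.append(image_filename)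
--     return baybayin_images
-- ===== SOURCE B (Python) =====
-- baybayin_image_mapping = {
--     'a': 'A.png', 'e': 'E.png', 'i': 'I.png', 'o': 'O.png', 'u': 'U.png',
--     'ka': 'ka.png', 'ga': 'ga.png', 'nga': 'nga.png', 'ta': 'ta.png', 'da': 'da.png',
--     'na': 'na.png', 'pa': 'pa.png', 'ba': 'Ba.png', 'ma': 'ma.png', 'ya': 'ya.png',
--     'ra': 'ra.png', 'la': 'la.png', 'wa': 'wa.png', 'sa': 'sa.png', 'ha': 'ha.png'
-- }
--
--
-- def text_to_baybayin_images(text):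
--     vowels = 'aeiou'
--     images = []
--     for word in text.split():
--         i, n = 0, len(word)
--         while i < n:
--             c = word[i]
--             if c not in vowels and i + 1 < n and word[i + 1] in vowels:
--                 syllable = c + word[i + 1]
--                 i += 2
--             else:
--                 syllable = c
--                 i += 1
--             image_filename = baybayin_image_mapping.get(syllable)
--             if image_filename:
--                 images.append(image_filename)
--     return images
-- ===== Notes on version B (the rewrite author's own statement) =====
-- stated objective: alternative
-- what changed: Replaces the two-phase design (a split_into_syllables accumulator state machine building a syllable list per word, then a lookup loop over that list) with a single index-based lookahead scan over each word that forms consonant+vowel or single-char syllables in place and looks each up immediately, building no intermediate syllable list.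
import Mathlib
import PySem

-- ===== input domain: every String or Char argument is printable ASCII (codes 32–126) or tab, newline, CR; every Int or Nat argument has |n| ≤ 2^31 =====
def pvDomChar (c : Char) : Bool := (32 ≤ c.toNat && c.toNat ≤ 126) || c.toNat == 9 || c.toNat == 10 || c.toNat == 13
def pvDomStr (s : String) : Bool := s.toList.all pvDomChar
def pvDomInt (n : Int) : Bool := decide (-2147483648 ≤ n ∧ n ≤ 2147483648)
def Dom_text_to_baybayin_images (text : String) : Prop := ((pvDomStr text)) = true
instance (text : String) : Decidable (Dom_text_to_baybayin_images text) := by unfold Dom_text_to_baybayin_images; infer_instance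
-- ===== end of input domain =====

-- B replaces A's two-phase design (accumulator state machine producing a syllable
-- list per word, then a lookup loop) with a single lookahead scan that forms each
-- syllable in place and looks it up immediately (objective: alternative).

-- shared module-level data: the baybayin image mapping and the vowel string
def pvMapping : PySem.Dict String String := PySem.Dict.ofList
  [("a", "A.png"), ("e", "E.png"), ("i", "I.png"), ("o", "O.png"), ("u", "U.png"),
   ("ka", "ka.png"), ("ga", "ga.png"), ("nga", "nga.png"), ("ta", "ta.png"), ("da", "da.png"),
   ("na", "na.png"), ("pa", "pa.png"), ("ba", "Ba.png"), ("ma", "ma.png"), ("ya", "ya.png"),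
   ("ra", "ra.png"), ("la", "la.png"), ("wa", "wa.png"), ("sa", "sa.png"), ("ha", "ha.png")]

def pvVowels : List Char := ['a', 'e', 'i', 'o', 'u']

-- ===== PORT A =====
-- strings built char by char are carried as List Char; tokens become String via String.ofList
def split_into_syllables (word : String) : List String :=
  let fin := word.toList.foldl
    (fun (st : List (List Char) × List Char) ch =>
      if ch ∈ pvVowels then (st.1 ++ [st.2 ++ [ch]], [])
      else ((if st.2 ≠ [] then st.1 ++ [st.2] else st.1), [ch]))
    ([], [])
  (if fin.2 ≠ [] then fin.1 ++ [fin.2] else fin.1).map String.ofList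

def text_to_baybayin_images (text : String) : List String :=
  (PySem.Str.split₀ text).foldl
    (fun acc word =>
      (split_into_syllables word).foldl
        (fun acc syl =>
          match pvMapping.get? syl with
          | some img => if img ≠ "" then acc ++ [img] else acc
          | none => acc)
        acc)
    []

-- ===== PORT B =====
-- the inner while loop of Source B: lookahead scan over the word's chars, looking up
-- each syllable as soon as it is formed (i/i+1 indexing becomes head/tail patterns)
def pvScanWord : List Char → List String → List String
  | [], acc => acc
  | [c], acc =>
      (match pvMapping.get? (String.ofList [c]) with
       | some img => if img ≠ "" then acc ++ [img] else acc
       | none => acc)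
  | c :: d :: rest, acc =>
      if c ∉ pvVowels ∧ d ∈ pvVowels then
        pvScanWord rest
          (match pvMapping.get? (String.ofList [c, d]) with
           | some img => if img ≠ "" then acc ++ [img] else acc
           | none => acc)
      else
        pvScanWord (d :: rest)
          (match pvMapping.get? (String.ofList [c]) with
           | some img => if img ≠ "" then acc ++ [img] else acc
           | none => acc)

def text_to_baybayin_images_alt (text : String) : List String :=
  (PySem.Str.split₀ text).foldl (fun acc w => pvScanWord w.toList acc) []

-- ===== PRECONDITION & SPEC =====
def Spec_text_to_baybayin_images (text : String) (out : List String) : Prop := out = text_to_baybayin_images_alt text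
instance (text : String) (out : List String) : Decidable (Spec_text_to_baybayin_images text out) := by unfold Spec_text_to_baybayin_images; infer_instance

-- ===== CLAIM (what is proved, stated in full; the proofs are below) =====
def Claim_equal_text_to_baybayin_images : Prop := ∀ (text : String), Dom_text_to_baybayin_images text → Spec_text_to_baybayin_images text (text_to_baybayin_images text)

-- ===== LEMMAS AND PROOFS =====

-- the syllable lookup common to both loop bodies, named for the proofs
def pvPush (acc : List String) (syl : String) : List String :=
  match pvMapping.get? syl with
  | some img => if img ≠ "" then acc ++ [img] else acc
  | none => acc

-- the token sequence produced by B's lookahead rule, as raw char lists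
def pvTok : List Char → List (List Char)
  | [] => []
  | [c] => [[c]]
  | c :: d :: rest =>
      if c ∉ pvVowels ∧ d ∈ pvVowels then [c, d] :: pvTok rest
      else [c] :: pvTok (d :: rest)

theorem pvScanWord_eq (chars : List Char) :
    ∀ acc, pvScanWord chars acc = (pvTok chars).foldl (fun a t => pvPush a (String.ofList t)) acc := by
  induction chars using pvTok.induct with
  | case1 => intro acc; simp [pvScanWord, pvTok]
  | case2 c => intro acc; simp [pvScanWord, pvTok, pvPush]
  | case3 c d rest h ih =>
      intro acc
      simp only [pvScanWord, pvTok, if_pos h, List.foldl_cons, ih, pvPush]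
  | case4 c d rest h ih =>
      intro acc
      simp only [pvScanWord, pvTok, if_neg h, List.foldl_cons, ih, pvPush]

-- A's accumulator step and finish, named for the proofs
def pvStep (st : List (List Char) × List Char) (ch : Char) : List (List Char) × List Char :=
  if ch ∈ pvVowels then (st.1 ++ [st.2 ++ [ch]], [])
  else ((if st.2 ≠ [] then st.1 ++ [st.2] else st.1), [ch])

def pvFinish (st : List (List Char) × List Char) : List (List Char) :=
  if st.2 ≠ [] then st.1 ++ [st.2] else st.1

-- the state machine, run from an empty current syllable or from a held consonant,
-- produces exactly B's lookahead tokens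
theorem pvFold_eq (chars : List Char) :
    (∀ ss, pvFinish (chars.foldl pvStep (ss, [])) = ss ++ pvTok chars) ∧
    (∀ ss c, c ∉ pvVowels → pvFinish (chars.foldl pvStep (ss, [c])) = ss ++ pvTok (c :: chars)) := by
  induction chars with
  | nil =>
      constructor
      · intro ss; simp [pvFinish, pvTok]
      · intro ss c _; simp [pvFinish, pvTok]
  | cons ch rest ih =>
      constructor
      · intro ss
        by_cases hv : ch ∈ pvVowels
        · rw [List.foldl_cons, show pvStep (ss, []) ch = (ss ++ [[ch]], []) from by
              simp [pvStep, hv], ih.1]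
          cases rest with
          | nil => simp [pvTok]
          | cons d rs => simp [pvTok, hv]
        · rw [List.foldl_cons, show pvStep (ss, []) ch = (ss, [ch]) from by
              simp [pvStep, hv], ih.2 ss ch hv]
      · intro ss c hc
        by_cases hv : ch ∈ pvVowels
        · rw [List.foldl_cons, show pvStep (ss, [c]) ch = (ss ++ [[c, ch]], []) from by
              simp [pvStep, hv], ih.1]
          simp [pvTok, hc, hv]
        · rw [List.foldl_cons, show pvStep (ss, [c]) ch = (ss ++ [[c]], [ch]) from by
              simp [pvStep, hv], ih.2 (ss ++ [[c]]) ch hv]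
          simp [pvTok, hc, hv]

theorem split_into_syllables_eq (word : String) :
    split_into_syllables word = (pvTok word.toList).map String.ofList := by
  rw [show split_into_syllables word
        = (pvFinish (word.toList.foldl pvStep ([], []))).map String.ofList from rfl,
      (pvFold_eq word.toList).1 []]
  simp

theorem word_eq (word : String) (acc : List String) :
    (split_into_syllables word).foldl pvPush acc = pvScanWord word.toList acc := by
  rw [split_into_syllables_eq, pvScanWord_eq, List.foldl_map]

-- ===== VERDICT (by name: the statement is the Claim_ definition above) =====
theorem text_to_baybayin_images_spec : Claim_equal_text_to_baybayin_images := by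
  intro text _
  show text_to_baybayin_images text = text_to_baybayin_images_alt text
  unfold text_to_baybayin_images text_to_baybayin_images_alt
  refine congrFun (congrFun (congrArg _ ?_) _) _
  funext acc w
  exact word_eq w acc
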